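-- pv_equiv track=rewrite | github.com/sigirisetti/python_projects | pylearn/DSA/SemiPrime.py | sieve
-- ===== SOURCE A (Python) =====
-- def sieve(N):
--     semi = set()
--     sieve = [True] * (N + 1)
--     sieve[0] = sieve[1] = False
--
--     i = 2
--     while i * i <= N:
--         if sieve[i]:
--             for j in range(i * i, N + 1, i):
--                 sieve[j] = False
--         i += 1
--
--     i = 2
--     while i * i <= N:
--         if sieve[i]:
--             for j in range(i * i, N + 1, i):
--                 if j % i == 0 and sieve[int(j / i)]:
--                     semi.add(j)
--         i += 1
--
--     return semi
-- ===== SOURCE B (Python) =====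
-- def sieve(N):
--     flags = [True] * (N + 1)
--     flags[0] = flags[1] = False
--     i = 2
--     while i * i <= N:
--         if flags[i]:
--             for j in range(i * i, N + 1, i):
--                 flags[j] = False
--         i += 1
--     primes = [k for k in range(2, N + 1) if flags[k]]
--     semi = set()
--     for p in primes:
--         if p * p > N:
--             break
--         for q in primes:
--             if p * q > N:
--                 break
--             if q >= p:
--                 semi.add(p * q)
--     return semi
-- ===== Notes on version B (the rewrite author's own statement) =====
-- stated objective: faster
-- what changed: Keeps A's sieve-marking pass but replaces A's second whole-range scan (every multiple j of every small prime, filtered by j%i==0 and a float-division lookup) by collecting the primes once into a list and enumerating products p*q of primes p<=q with p*q<=N directly, breaking early on the sorted prime list.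
import Mathlib
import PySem

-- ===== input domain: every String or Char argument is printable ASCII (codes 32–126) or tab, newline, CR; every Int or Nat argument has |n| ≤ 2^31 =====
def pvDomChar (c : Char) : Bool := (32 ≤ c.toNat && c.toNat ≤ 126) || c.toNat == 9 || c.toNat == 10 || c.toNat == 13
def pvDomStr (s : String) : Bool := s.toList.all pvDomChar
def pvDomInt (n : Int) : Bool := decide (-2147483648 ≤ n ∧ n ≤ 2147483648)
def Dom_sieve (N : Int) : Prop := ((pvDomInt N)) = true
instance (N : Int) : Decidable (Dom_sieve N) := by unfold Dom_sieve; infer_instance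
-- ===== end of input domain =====

-- B keeps A's sieve-marking pass but enumerates products of primes p ≤ q with p*q ≤ N directly
-- (early break on the sorted prime list) instead of rescanning every multiple; measured faster in a timing run.

-- arithmetic fact the two while-loop ports cite in their decreasing_by
theorem pv_le_of_sq_le {i N : Int} (h : i * i ≤ N) : i ≤ N := by
  by_cases h0 : i ≤ 0
  · have : (0:Int) ≤ i * i := mul_self_nonneg i
    omega
  · have : i * 1 ≤ i * i := mul_le_mul_of_nonneg_left (by omega) (by omega)
    omega

-- ===== PORT A =====
-- `sieve = [True]*(N+1); sieve[0] = sieve[1] = False` (indices in range iff N ≥ 1; N ≤ 0 raises IndexError, excluded by Pre_)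
def pvFlags (N : Int) : List Bool :=
  ((List.replicate (N + 1).toNat true).set 0 false).set 1 false

-- first while-loop (textually identical in A and in Source B): unmark the multiples of each i with i*i ≤ N
def pvMarkLoop (N i : Int) (fl : List Bool) : List Bool :=
  if h : i * i ≤ N then
    pvMarkLoop N (i + 1)
      (if PySem.List.pyGetD fl i false then
        (PySem.List.pyRange (i * i) (N + 1) i).foldl (fun f j => f.set j.toNat false) fl
      else fl)
  else fl
termination_by (N + 1 - i).toNat
decreasing_by have := pv_le_of_sq_le h; omega

-- inner for-loop of A's second pass; Python's int(j/i) is PySem.Int.truncdiv (exact here: 0 ≤ j ≤ N ≤ 2^31 < 2^53 on Dom)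
def pvInnerA (N i : Int) (fl : List Bool) (semi : List Int) : List Int :=
  (PySem.List.pyRange (i * i) (N + 1) i).foldl
    (fun s j =>
      if (PySem.Int.mod j i == 0) && PySem.List.pyGetD fl (PySem.Int.truncdiv j i) false then
        PySem.Set.add s j
      else s) semi

-- second while-loop of A
def pvSemiLoop (N i : Int) (fl : List Bool) (semi : List Int) : List Int :=
  if h : i * i ≤ N then
    pvSemiLoop N (i + 1) fl
      (if PySem.List.pyGetD fl i false then pvInnerA N i fl semi else semi)
  else semi
termination_by (N + 1 - i).toNat
decreasing_by have := pv_le_of_sq_le h; omega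

def sieve (N : Int) : List Int :=
  pvSemiLoop N 2 (pvMarkLoop N 2 (pvFlags N)) []

-- ===== PORT B =====
-- `primes = [k for k in range(2, N+1) if flags[k]]`
def pvPrimes (N : Int) (fl : List Bool) : List Int :=
  (PySem.List.pyRange 2 (N + 1) 1).filter (fun k => PySem.List.pyGetD fl k false)

-- the two for-loops over the prime list; `break` on the ascending list is takeWhile
def pvSemiB (N : Int) (primes : List Int) : List Int :=
  (primes.takeWhile (fun p => decide (p * p ≤ N))).foldl
    (fun s p =>
      (primes.takeWhile (fun q => decide (p * q ≤ N))).foldl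
        (fun s q => if p ≤ q then PySem.Set.add s (p * q) else s) s) []

def sieve_alt (N : Int) : List Int :=
  pvSemiB N (pvPrimes N (pvMarkLoop N 2 (pvFlags N)))

-- ===== PRECONDITION & SPEC =====
-- A raises IndexError (in `sieve[0] = sieve[1] = False`) for every N ≤ 0; it returns normally for all N ≥ 1.
def Pre_sieve (N : Int) : Prop := 1 ≤ N
instance (N : Int) : Decidable (Pre_sieve N) := by unfold Pre_sieve; infer_instance
def pvWitness_sieve : Int := (10)
def Spec_sieve (N : Int) (out : List Int) : Prop := out = sieve_alt N
instance (N : Int) (out : List Int) : Decidable (Spec_sieve N out) := by unfold Spec_sieve; infer_instance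

-- ===== CLAIM (what is proved, stated in full; the proofs are below) =====
def Claim_equal_sieve : Prop := ∀ (N : Int), Dom_sieve N → Pre_sieve N → Spec_sieve N (sieve N)

-- ===== LEMMAS AND PROOFS =====

theorem pv_sq_mono {a b : Int} (h0 : 0 ≤ a) (hab : a ≤ b) : a * a ≤ b * b :=
  mul_le_mul hab hab h0 (by omega)

-- A's second while-loop is a fold of pvInnerA over the flagged p with p*p ≤ N, in increasing order
theorem pvSemiLoop_eq (N : Int) (fl : List Bool) :
    ∀ (k : Nat) (i : Int), 2 ≤ i → (N + 1 - i).toNat ≤ k → ∀ (semi : List Int),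
    pvSemiLoop N i fl semi =
      ((PySem.List.pyRange i (N + 1) 1).filter
        (fun p => decide (p * p ≤ N) && PySem.List.pyGetD fl p false)).foldl
        (fun s p => pvInnerA N p fl s) semi := by
  intro k
  induction k with
  | zero =>
      intro i hi hk semi
      have h1 : ¬ (i * i ≤ N) := fun h => by have := pv_le_of_sq_le h; omega
      rw [pvSemiLoop, dif_neg h1, PySem.List.pyRange_one_eq_nil (by omega), List.filter_nil,
        List.foldl_nil]
  | succ k ih =>
      intro i hi hk semi
      by_cases h1 : i * i ≤ N
      · have hiN : i ≤ N := pv_le_of_sq_le h1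
        rw [pvSemiLoop, dif_pos h1, ih (i + 1) (by omega) (by omega),
          PySem.List.pyRange_one_cons (by omega : i < N + 1), List.filter_cons]
        by_cases h2 : PySem.List.pyGetD fl i false
        · simp [h1, h2]
        · simp [h1, h2]
      · rw [pvSemiLoop, dif_neg h1]
        have hnil : (PySem.List.pyRange i (N + 1) 1).filter
            (fun p => decide (p * p ≤ N) && PySem.List.pyGetD fl p false) = [] := by
          rw [List.filter_eq_nil_iff]
          intro p hp
          have hm := (PySem.List.mem_pyRange_one).mp hp
          have hpp : ¬ (p * p ≤ N) := fun hpp =>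
            h1 (le_trans (pv_sq_mono (by omega) hm.1) hpp)
          simp [hpp]
        rw [hnil, List.foldl_nil]

-- range(p*p, N+1, p) is p times range(p, N//p + 1)
theorem pvRange_step_eq (N p : Int) (hp : 2 ≤ p) (hpp : p * p ≤ N) :
    PySem.List.pyRange (p * p) (N + 1) p =
      (PySem.List.pyRange p (N / p + 1) 1).map (fun k => p * k) := by
  rw [PySem.List.pyRange_of_pos _ _ (by omega : (0:Int) < p), PySem.List.pyRange_one,
    List.map_map, if_pos (by omega : p * p < N + 1)]
  have h2 : (N + 1 - p * p + p - 1) / p = N / p + (1 - p) := by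
    have h1 : (N + 1 - p * p + p - 1) = N + (1 - p) * p := by ring
    rw [h1, Int.add_mul_ediv_right _ _ (by omega : p ≠ 0)]
  rw [h2]
  have h3 : (N / p + (1 - p)).toNat = (N / p + 1 - p).toNat := by omega
  rw [h3]
  apply List.map_congr_left
  intro k _
  simp [Function.comp]
  ring

-- A's inner loop adds p*k for the flagged k in range(p, N//p + 1)
theorem pvInnerA_eq (N p : Int) (fl : List Bool) (semi : List Int) (hp : 2 ≤ p)
    (hpp : p * p ≤ N) :
    pvInnerA N p fl semi =
      ((PySem.List.pyRange p (N / p + 1) 1).filter (fun k => PySem.List.pyGetD fl k false)).foldl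
        (fun s k => PySem.Set.add s (p * k)) semi := by
  rw [pvInnerA, pvRange_step_eq N p hp hpp, List.foldl_map]
  rw [PySem.List.foldl_congr_mem _ _
      (fun s k => if PySem.List.pyGetD fl k false then PySem.Set.add s (p * k) else s) _ ?_]
  · exact PySem.List.foldl_if_eq_foldl_filter _ _ _ _
  · intro acc k hk
    have hmod : PySem.Int.mod (p * k) p = 0 :=
      (PySem.Int.mod_eq_zero_iff_dvd _ _).mpr ⟨k, rfl⟩
    have hdiv : PySem.Int.truncdiv (p * k) p = k := by
      simp only [PySem.Int.truncdiv]
      exact Int.mul_tdiv_cancel_left _ (by omega)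
    simp [hmod, hdiv]

-- on a strictly increasing list, takeWhile of a downward-closed predicate is filter ('break' = 'continue')
theorem pv_takeWhile_eq_filter {l : List Int} {P : Int → Bool} (hs : l.Pairwise (· < ·))
    (hdc : ∀ a b : Int, a ∈ l → b ∈ l → a ≤ b → P b = true → P a = true) :
    l.takeWhile P = l.filter P := by
  induction l with
  | nil => rfl
  | cons x t ih =>
      rcases List.pairwise_cons.mp hs with ⟨hx, ht⟩
      by_cases hP : P x = true
      · rw [List.takeWhile_cons_of_pos hP, List.filter_cons_of_pos hP]
        exact congrArg _ (ih ht (fun a b ha hb hab h =>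
          hdc a b (.tail _ ha) (.tail _ hb) hab h))
      · rw [List.takeWhile_cons_of_neg hP, List.filter_cons_of_neg hP]
        symm
        rw [List.filter_eq_nil_iff]
        intro b hb hPb
        exact hP (hdc x b (.head _) (.tail _ hb) (le_of_lt (hx b hb)) hPb)

-- the k in range(2, N+1) with p ≤ k and p*k ≤ N are exactly range(p, N//p + 1)
theorem pv_filter_range (N p : Int) (fl : List Bool) (hp : 2 ≤ p) (hpp : p * p ≤ N) :
    (PySem.List.pyRange 2 (N + 1) 1).filter
      (fun q => decide (p ≤ q) && (decide (p * q ≤ N) && PySem.List.pyGetD fl q false))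
      = (PySem.List.pyRange p (N / p + 1) 1).filter (fun k => PySem.List.pyGetD fl k false) := by
  have hNpos : (0:Int) ≤ N := by nlinarith
  have hpN : p ≤ N / p := (Int.le_ediv_iff_mul_le (by omega)).mpr hpp
  have hNN : N / p ≤ N := Int.ediv_le_self p hNpos
  rw [PySem.List.pyRange_one_append 2 p (N + 1) (by omega) (by omega),
    PySem.List.pyRange_one_append p (N / p + 1) (N + 1) (by omega) (by omega),
    List.filter_append, List.filter_append]
  have hseg1 : (PySem.List.pyRange 2 p 1).filter
      (fun q => decide (p ≤ q) && (decide (p * q ≤ N) && PySem.List.pyGetD fl q false)) = [] := by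
    rw [List.filter_eq_nil_iff]
    intro q hq
    have hm := (PySem.List.mem_pyRange_one).mp hq
    have : ¬ (p ≤ q) := by omega
    simp [this]
  have hseg3 : (PySem.List.pyRange (N / p + 1) (N + 1) 1).filter
      (fun q => decide (p ≤ q) && (decide (p * q ≤ N) && PySem.List.pyGetD fl q false)) = [] := by
    rw [List.filter_eq_nil_iff]
    intro q hq
    have hm := (PySem.List.mem_pyRange_one).mp hq
    have hlt : N < q * p := (Int.ediv_lt_iff_lt_mul (by omega : (0:Int) < p)).mp (by omega)
    have : ¬ (p * q ≤ N) := by nlinarith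
    simp [this]
  have hseg2 : (PySem.List.pyRange p (N / p + 1) 1).filter
      (fun q => decide (p ≤ q) && (decide (p * q ≤ N) && PySem.List.pyGetD fl q false))
      = (PySem.List.pyRange p (N / p + 1) 1).filter (fun k => PySem.List.pyGetD fl k false) := by
    apply List.filter_congr
    intro q hq
    have hm := (PySem.List.mem_pyRange_one).mp hq
    have h1 : p * q ≤ N := by
      have hqp : q * p ≤ N :=
        (Int.le_ediv_iff_mul_le (by omega : (0:Int) < p)).mp (by omega)
      nlinarith [hqp]
    have h2 : p ≤ q := hm.1
    simp [h1, h2]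
  rw [hseg1, hseg3, hseg2, List.nil_append, List.append_nil]

-- the core equivalence, for an arbitrary flag array
theorem pv_core (N : Int) (fl : List Bool) :
    pvSemiLoop N 2 fl [] = pvSemiB N (pvPrimes N fl) := by
  have hpair : ((PySem.List.pyRange 2 (N + 1) 1).filter
      (fun k => PySem.List.pyGetD fl k false)).Pairwise (· < ·) :=
    (PySem.List.pairwise_lt_pyRange_one 2 (N + 1)).filter _
  have hmem : ∀ x ∈ (PySem.List.pyRange 2 (N + 1) 1).filter
      (fun k => PySem.List.pyGetD fl k false), 2 ≤ x := by
    intro x hx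
    exact ((PySem.List.mem_pyRange_one).mp (List.mem_filter.mp hx).1).1
  rw [pvSemiLoop_eq N fl (N + 1 - 2).toNat 2 (by omega) (by omega)]
  rw [pvSemiB, pvPrimes]
  rw [pv_takeWhile_eq_filter hpair (fun a b ha hb hab hPb => by
    have ha2 := hmem a ha
    have := pv_sq_mono (by omega : (0:Int) ≤ a) hab
    simp only [decide_eq_true_eq] at hPb ⊢
    omega)]
  rw [List.filter_filter]
  apply PySem.List.foldl_congr_mem
  intro acc p hp
  rcases List.mem_filter.mp hp with ⟨hr, hpf⟩
  have hm := (PySem.List.mem_pyRange_one).mp hr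
  have hp2 : 2 ≤ p := hm.1
  simp only [Bool.and_eq_true, decide_eq_true_eq] at hpf
  have hppN : p * p ≤ N := hpf.1
  rw [pvInnerA_eq N p fl acc hp2 hppN]
  rw [pv_takeWhile_eq_filter hpair (fun a b ha hb hab hPb => by
    simp only [decide_eq_true_eq] at hPb ⊢
    nlinarith)]
  rw [List.filter_filter,
    PySem.List.foldl_ite_eq_foldl_filter (fun q => p ≤ q)
      (fun s q => PySem.Set.add s (p * q)), List.filter_filter,
    pv_filter_range N p fl hp2 hppN]

theorem sieve_eq (N : Int) : sieve N = sieve_alt N := by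
  rw [sieve, sieve_alt]
  exact pv_core N (pvMarkLoop N 2 (pvFlags N))

-- ===== VERDICT (by name: the statement is the Claim_ definition above) =====
theorem sieve_spec : Claim_equal_sieve := by
  unfold Claim_equal_sieve Spec_sieve
  exact fun N _ _ => sieve_eq N
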